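-- pv_equiv track=rewrite | github.com/JKL37/Journal | mysite/polls/views.py | create_date_dict
-- ===== SOURCE A (Python) =====
-- def create_date_dict(lessons):
--     tmp_arr = {}
--     for lesson in lessons:
--         if str(lesson["year"]) in tmp_arr.keys():
--             if str(lesson["month"]) in tmp_arr[str(lesson["year"])].keys():
--                 if str(lesson["day"]) in tmp_arr[str(lesson["year"])][str(lesson["month"])].keys():
--                     tmp_arr[str(lesson["year"])][str(lesson["month"])][str(lesson["day"])].append(lesson)
--                 else:
--                     tmp_arr[str(lesson["year"])][str(lesson["month"])][str(lesson["day"])] = []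
--                     tmp_arr[str(lesson["year"])][str(lesson["month"])][str(lesson["day"])].append(lesson)
--             else:
--                 tmp_arr[str(lesson["year"])][str(lesson["month"])] = {}
--                 tmp_arr[str(lesson["year"])][str(lesson["month"])][str(lesson["day"])] = []
--                 tmp_arr[str(lesson["year"])][str(lesson["month"])][str(lesson["day"])].append(lesson)
--         else:
--             tmp_arr[str(lesson["year"])] = {}
--             if str(lesson["month"]) in tmp_arr[str(lesson["year"])].keys():
--                 if str(lesson["day"]) in tmp_arr[str(lesson["year"])][str(lesson["month"])].keys():
--                     tmp_arr[str(lesson["year"])][str(lesson["month"])][str(lesson["day"])].append(lesson)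
--                 else:
--                     tmp_arr[str(lesson["year"])][str(lesson["month"])][str(lesson["day"])] = []
--                     tmp_arr[str(lesson["year"])][str(lesson["month"])][str(lesson["day"])].append(lesson)
--             else:
--                 tmp_arr[str(lesson["year"])][str(lesson["month"])] = {}
--                 if str(lesson["day"]) in tmp_arr[str(lesson["year"])][str(lesson["month"])].keys():
--                     tmp_arr[str(lesson["year"])][str(lesson["month"])][str(lesson["day"])].append(lesson)
--                 else:
--                     tmp_arr[str(lesson["year"])][str(lesson["month"])][str(lesson["day"])] = []
--                     tmp_arr[str(lesson["year"])][str(lesson["month"])][str(lesson["day"])].append(lesson)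
--     return tmp_arr
-- ===== SOURCE B (Python) =====
-- def create_date_dict(lessons):
--     # Pass 1: group lessons by their (year, month, day) string triple, in first-occurrence order.
--     groups = {}
--     for lesson in lessons:
--         key = (str(lesson["year"]), str(lesson["month"]), str(lesson["day"]))
--         if key in groups:
--             groups[key].append(lesson)
--         else:
--             groups[key] = [lesson]
--     # Pass 2: unfold the flat groups into the nested year/month/day structure.
--     result = {}
--     for (y, m, d), ls in groups.items():
--         result.setdefault(y, {}).setdefault(m, {})[d] = ls
--     return result
-- ===== Notes on version B (the rewrite author's own statement) =====
-- stated objective: alternative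
-- what changed: A builds the nested year/month/day dict with one scan that probes and patches three dict levels per lesson through a cascade of membership branches; B instead groups lessons by their (year,month,day) string triple into one flat dict in a first pass and then unfolds that flat dict into the nested structure in a second pass.
import Mathlib
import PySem

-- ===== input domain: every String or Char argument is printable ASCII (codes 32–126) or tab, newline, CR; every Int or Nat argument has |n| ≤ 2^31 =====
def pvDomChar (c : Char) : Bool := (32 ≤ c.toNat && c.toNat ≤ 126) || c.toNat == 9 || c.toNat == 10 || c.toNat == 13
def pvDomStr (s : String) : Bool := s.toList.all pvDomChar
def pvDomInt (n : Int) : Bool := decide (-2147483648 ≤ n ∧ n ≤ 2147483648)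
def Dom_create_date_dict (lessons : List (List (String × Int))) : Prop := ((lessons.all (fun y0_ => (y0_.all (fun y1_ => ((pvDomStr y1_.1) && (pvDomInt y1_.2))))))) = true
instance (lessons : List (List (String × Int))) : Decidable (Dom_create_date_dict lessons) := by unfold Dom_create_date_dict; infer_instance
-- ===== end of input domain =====

-- B builds the same nested dict by flat (year,month,day)-triple grouping followed by an unfolding pass,
-- instead of A's per-lesson three-level probe-and-patch branch cascade ("alternative", same cost).

-- a lesson dict, and the three nested dict levels of the result
abbrev PvLesson := List (String × Int)
abbrev PvDayD := PySem.Dict String (List PvLesson)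
abbrev PvMonD := PySem.Dict String PvDayD
abbrev PvYearD := PySem.Dict String PvMonD
abbrev PvKey := String × String × String
abbrev PvFlat := PySem.Dict PvKey (List PvLesson)

-- str(lesson["year"]) / ["month"] / ["day"]  (default 0 is never read inside Pre_, where the keys exist)
def pvYear (l : PvLesson) : String := PySem.Int.toStr ((PySem.Dict.mk l).getD "year" 0)
def pvMonth (l : PvLesson) : String := PySem.Int.toStr ((PySem.Dict.mk l).getD "month" 0)
def pvDay (l : PvLesson) : String := PySem.Int.toStr ((PySem.Dict.mk l).getD "day" 0)

-- render the nested Dict state as the required plain association-list type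
def pvOut (t : PvYearD) : List (String × List (String × List (String × List PvLesson))) :=
  t.items.map (fun p => (p.1, p.2.items.map (fun q => (q.1, q.2.items))))

-- ===== PORT A =====
-- A's loop body: the nested membership-branch cascade (mutations rendered as Dict.modify/insert)
def pvStepA (t : PvYearD) (lesson : PvLesson) : PvYearD :=
  let y := pvYear lesson
  let m := pvMonth lesson
  let d := pvDay lesson
  if t.contains y then
    if (t.getD y PySem.Dict.empty).contains m then
      if ((t.getD y PySem.Dict.empty).getD m PySem.Dict.empty).contains d then
        t.modify y PySem.Dict.empty (fun mon => mon.modify m PySem.Dict.empty (fun day => day.modify d [] (· ++ [lesson])))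
      else
        let t1 := t.modify y PySem.Dict.empty (fun mon => mon.modify m PySem.Dict.empty (fun day => day.insert d []))
        t1.modify y PySem.Dict.empty (fun mon => mon.modify m PySem.Dict.empty (fun day => day.modify d [] (· ++ [lesson])))
    else
      let t1 := t.modify y PySem.Dict.empty (fun mon => mon.insert m PySem.Dict.empty)
      let t2 := t1.modify y PySem.Dict.empty (fun mon => mon.modify m PySem.Dict.empty (fun day => day.insert d []))
      t2.modify y PySem.Dict.empty (fun mon => mon.modify m PySem.Dict.empty (fun day => day.modify d [] (· ++ [lesson])))
  else
    let t0 := t.insert y PySem.Dict.empty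
    if (t0.getD y PySem.Dict.empty).contains m then
      if ((t0.getD y PySem.Dict.empty).getD m PySem.Dict.empty).contains d then
        t0.modify y PySem.Dict.empty (fun mon => mon.modify m PySem.Dict.empty (fun day => day.modify d [] (· ++ [lesson])))
      else
        let t1 := t0.modify y PySem.Dict.empty (fun mon => mon.modify m PySem.Dict.empty (fun day => day.insert d []))
        t1.modify y PySem.Dict.empty (fun mon => mon.modify m PySem.Dict.empty (fun day => day.modify d [] (· ++ [lesson])))
    else
      let t1 := t0.modify y PySem.Dict.empty (fun mon => mon.insert m PySem.Dict.empty)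
      if ((t1.getD y PySem.Dict.empty).getD m PySem.Dict.empty).contains d then
        t1.modify y PySem.Dict.empty (fun mon => mon.modify m PySem.Dict.empty (fun day => day.modify d [] (· ++ [lesson])))
      else
        let t2 := t1.modify y PySem.Dict.empty (fun mon => mon.modify m PySem.Dict.empty (fun day => day.insert d []))
        t2.modify y PySem.Dict.empty (fun mon => mon.modify m PySem.Dict.empty (fun day => day.modify d [] (· ++ [lesson])))

def create_date_dict (lessons : List (List (String × Int))) : List (String × List (String × List (String × List (List (String × Int))))) :=
  pvOut (lessons.foldl pvStepA PySem.Dict.empty)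

-- ===== PORT B =====
-- B pass 1: group by the (year, month, day) string triple
def pvStepF (g : PvFlat) (lesson : PvLesson) : PvFlat :=
  let k : PvKey := (pvYear lesson, pvMonth lesson, pvDay lesson)
  if g.contains k then g.modify k [] (· ++ [lesson]) else g.insert k [lesson]

-- B pass 2 body: result.setdefault(y, {}).setdefault(m, {})[d] = ls
def pvInsNest (r : PvYearD) (e : PvKey × List PvLesson) : PvYearD :=
  let months := r.getD e.1.1 PySem.Dict.empty
  let days := months.getD e.1.2.1 PySem.Dict.empty
  r.insert e.1.1 (months.insert e.1.2.1 (days.insert e.1.2.2 e.2))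

def create_date_dict_alt (lessons : List (List (String × Int))) : List (String × List (String × List (String × List (List (String × Int))))) :=
  pvOut (((lessons.foldl pvStepF PySem.Dict.empty).items).foldl pvInsNest PySem.Dict.empty)

-- ===== PRECONDITION & SPEC =====
-- Pre_ excludes exactly the lessons lacking a "year"/"month"/"day" key, where Python's lesson[...] raises KeyError (in A and B alike).
def Pre_create_date_dict (lessons : List (List (String × Int))) : Prop :=
  ∀ l ∈ lessons, "year" ∈ l.map Prod.fst ∧ "month" ∈ l.map Prod.fst ∧ "day" ∈ l.map Prod.fst
instance (lessons : List (List (String × Int))) : Decidable (Pre_create_date_dict lessons) := by unfold Pre_create_date_dict; infer_instance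

def pvWitness_create_date_dict : (List (List (String × Int))) :=
  [[("year", 2024), ("month", 5), ("day", 7)], [("year", 2024), ("month", 5), ("day", 7)], [("year", 2023), ("month", 5), ("day", 1)]]

def Spec_create_date_dict (lessons : List (List (String × Int))) (out : List (String × List (String × List (String × List (List (String × Int)))))) : Prop := out = create_date_dict_alt lessons
instance (lessons : List (List (String × Int))) (out : List (String × List (String × List (String × List (List (String × Int)))))) : Decidable (Spec_create_date_dict lessons out) := by
  unfold Spec_create_date_dict
  haveI : DecidableEq (String × List (String × List (List (String × Int)))) := instDecidableEqProd
  haveI : DecidableEq (String × List (String × List (String × List (List (String × Int))))) := instDecidableEqProd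
  infer_instance

-- ===== CLAIM (what is proved, stated in full; the proofs are below) =====
def Claim_equal_create_date_dict : Prop := ∀ (lessons : List (List (String × Int))), Dom_create_date_dict lessons → Pre_create_date_dict lessons → Spec_create_date_dict lessons (create_date_dict lessons)

-- ===== LEMMAS AND PROOFS =====

-- proof-only abbreviations
def pvKey (l : PvLesson) : PvKey := (pvYear l, pvMonth l, pvDay l)

def pvNest (L : List (PvKey × List PvLesson)) : PvYearD := L.foldl pvInsNest PySem.Dict.empty

-- whether the nested state already holds the path k = (y, m, d)
def pvPath (t : PvYearD) (k : PvKey) : Bool :=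
  ((t.getD k.1 PySem.Dict.empty).getD k.2.1 PySem.Dict.empty).contains k.2.2

-- the deep-append that A performs when the whole path exists
def pvM (t : PvYearD) (k : PvKey) (lesson : PvLesson) : PvYearD :=
  t.insert k.1 ((t.getD k.1 PySem.Dict.empty).insert k.2.1
    (((t.getD k.1 PySem.Dict.empty).getD k.2.1 PySem.Dict.empty).insert k.2.2
      ((((t.getD k.1 PySem.Dict.empty).getD k.2.1 PySem.Dict.empty).getD k.2.2 []) ++ [lesson])))

-- Bool bridges for the triple key
theorem pvKey_beq (a b : PvKey) : (a == b) = (a.1 == b.1 && (a.2.1 == b.2.1 && a.2.2 == b.2.2)) := rfl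

theorem pvKey_beq_eq_decide (a b : PvKey) : (a == b) = decide (a = b) := by
  by_cases h : a = b <;> simp [h]

theorem pvKey_beq_comm (a b : PvKey) : (a == b) = (b == a) := by
  rw [pvKey_beq_eq_decide, pvKey_beq_eq_decide]
  simp [eq_comm]

-- the path test after one unfolding step
theorem pvPath_insNest (r : PvYearD) (e : PvKey × List PvLesson) (k : PvKey) :
    pvPath (pvInsNest r e) k = (k == e.1 || pvPath r k) := by
  rcases e with ⟨⟨ey, em, ed⟩, ls⟩
  rcases k with ⟨ky, km, kd⟩
  simp only [pvPath, pvInsNest]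
  rw [PySem.Dict.getD_insert]
  split_ifs with hy
  · subst hy
    rw [PySem.Dict.getD_insert]
    split_ifs with hm
    · subst hm
      rw [PySem.Dict.contains_insert]
      by_cases hd : kd = ed
      · simp [hd]
      · simp [pvKey_beq]
    · simp [pvKey_beq, hm]
  · simp [pvKey_beq, hy]

-- the path test after unfolding a whole flat list
theorem pvPath_foldl (L : List (PvKey × List PvLesson)) (r : PvYearD) (k : PvKey) :
    pvPath (L.foldl pvInsNest r) k = (pvPath r k || L.any (fun p => p.1 == k)) := by
  induction L generalizing r with
  | nil => simp
  | cons e L ih =>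
    rw [List.foldl_cons, ih, pvPath_insNest, List.any_cons, pvKey_beq_comm]
    simp [Bool.or_comm, Bool.or_assoc]

-- pass 1 keeps the flat keys unique
theorem pv_nodup_stepF (g : PvFlat) (l : PvLesson) (h : g.keys.Nodup) : (pvStepF g l).keys.Nodup := by
  unfold pvStepF
  by_cases hc : g.contains (pvYear l, pvMonth l, pvDay l) = true
  · simp only [hc, if_true, PySem.Dict.modify]
    rw [PySem.Dict.keys_insert_of_contains _ _ hc]
    exact h
  · have hcf : g.contains (pvYear l, pvMonth l, pvDay l) = false := by simpa using hc
    simp only [hcf, Bool.false_eq_true, if_false]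
    rw [PySem.Dict.keys_insert_of_not_contains _ _ hcf]
    have hnm : (pvYear l, pvMonth l, pvDay l) ∉ g.keys := fun hm =>
      hc ((PySem.Dict.contains_iff_mem_keys g _).mpr hm)
    simp only [List.nodup_append, List.nodup_singleton, true_and]
    refine ⟨h, ?_⟩
    intro a ha b hb
    rw [List.mem_singleton] at hb
    subst hb
    exact fun he => hnm (he ▸ ha)

-- two inserts at distinct keys commute when the first key is already present
theorem pv_insert_insert_comm {κ ν : Type} [BEq κ] [LawfulBEq κ] (d : PySem.Dict κ ν)
    {k k' : κ} (v v' : ν) (hc : d.contains k = true) (hne : k' ≠ k) :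
    (d.insert k v).insert k' v' = (d.insert k' v').insert k v := by
  apply PySem.Dict.ext
  by_cases hc' : d.contains k' = true
  · have h1 : (d.insert k v).contains k' = true := by rw [PySem.Dict.contains_insert]; simp [hc']
    have h2 : (d.insert k' v').contains k = true := by rw [PySem.Dict.contains_insert]; simp [hc]
    rw [PySem.Dict.items_insert_of_contains _ _ h1, PySem.Dict.items_insert_of_contains _ _ hc,
        PySem.Dict.items_insert_of_contains _ _ h2, PySem.Dict.items_insert_of_contains _ _ hc',
        List.map_map, List.map_map]
    apply List.map_congr_left
    intro p _
    simp only [Function.comp]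
    by_cases e1 : p.1 = k
    · simp [e1, Ne.symm hne]
    · by_cases e2 : p.1 = k' <;> simp [e1, e2, hne]
  · have hcf : d.contains k' = false := by simpa using hc'
    have h1 : (d.insert k v).contains k' = false := by
      rw [PySem.Dict.contains_insert]; simp [hcf, hne]
    have h2 : (d.insert k' v').contains k = true := by rw [PySem.Dict.contains_insert]; simp [hc]
    rw [PySem.Dict.items_insert_of_not_contains _ _ h1, PySem.Dict.items_insert_of_contains _ _ hc,
        PySem.Dict.items_insert_of_contains _ _ h2, PySem.Dict.items_insert_of_not_contains _ _ hcf,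
        List.map_append]
    simp only [List.map_cons, List.map_nil]
    congr 1
    rw [if_neg (by simp [hne])]

-- appending one more lesson to a group = deep-appending it after unfolding the group
theorem pvM_insNest_self (n : PvYearD) (k : PvKey) (ls : List PvLesson) (lesson : PvLesson) :
    pvInsNest n (k, ls ++ [lesson]) = pvM (pvInsNest n (k, ls)) k lesson := by
  rcases k with ⟨y, m, d⟩
  simp only [pvInsNest, pvM, PySem.Dict.getD_insert_self, PySem.Dict.insert_insert_self]

-- an existing path means the two outer keys are present
theorem pv_path_contains (n : PvYearD) (k : PvKey) (h : pvPath n k = true) :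
    n.contains k.1 = true ∧ (n.getD k.1 PySem.Dict.empty).contains k.2.1 = true := by
  unfold pvPath at h
  by_cases c1 : n.contains k.1 = true
  · refine ⟨c1, ?_⟩
    by_cases c2 : (n.getD k.1 PySem.Dict.empty).contains k.2.1 = true
    · exact c2
    · rw [PySem.Dict.getD_of_not_contains _ _ (by simpa using c2)] at h
      simp [PySem.Dict.contains_empty] at h
  · rw [PySem.Dict.getD_of_not_contains n PySem.Dict.empty (by simpa using c1)] at h
    simp [PySem.Dict.contains_empty] at h

-- the deep append commutes with unfolding a DIFFERENT group
theorem pvM_insNest_comm (n : PvYearD) (e : PvKey × List PvLesson) (k : PvKey) (lesson : PvLesson)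
    (hne : e.1 ≠ k) (hp : pvPath n k = true) :
    pvM (pvInsNest n e) k lesson = pvInsNest (pvM n k lesson) e := by
  obtain ⟨hcy, hcm⟩ := pv_path_contains n k hp
  rcases e with ⟨⟨ey, em, ed⟩, ls⟩
  rcases k with ⟨ky, km, kd⟩
  simp only [pvPath] at hp
  by_cases hy : ey = ky
  · subst hy
    by_cases hm : em = km
    · subst hm
      have hd : ed ≠ kd := fun hd => hne (by rw [hd])
      simp only [pvM, pvInsNest, PySem.Dict.getD_insert_self, PySem.Dict.insert_insert_self]
      rw [PySem.Dict.getD_insert_of_ne _ _ _ (Ne.symm hd)]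
      rw [pv_insert_insert_comm _ _ _ hp hd]
    · simp only [pvM, pvInsNest, PySem.Dict.getD_insert_self, PySem.Dict.insert_insert_self]
      rw [PySem.Dict.getD_insert_of_ne _ _ _ (Ne.symm hm), PySem.Dict.getD_insert_of_ne _ _ _ hm]
      rw [pv_insert_insert_comm _ _ _ hcm hm]
  · simp only [pvM, pvInsNest]
    rw [PySem.Dict.getD_insert_of_ne _ _ _ (Ne.symm hy), PySem.Dict.getD_insert_of_ne _ _ _ hy]
    rw [pv_insert_insert_comm _ _ _ hcy hy]

-- … and hence with unfolding a whole list of different groups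
theorem pv_foldl_M (post : List (PvKey × List PvLesson)) (n : PvYearD) (k : PvKey) (lesson : PvLesson)
    (hne : ∀ p ∈ post, p.1 ≠ k) (hp : pvPath n k = true) :
    post.foldl pvInsNest (pvM n k lesson) = pvM (post.foldl pvInsNest n) k lesson := by
  induction post generalizing n with
  | nil => rfl
  | cons e post ih =>
    rw [List.foldl_cons, List.foldl_cons, ← pvM_insNest_comm n e k lesson (hne e (by simp)) hp]
    exact ih (pvInsNest n e) (fun p hp' => hne p (by simp [hp']))
      (by rw [pvPath_insNest, hp]; simp)

-- unfolding the flat list with one group's lesson list extended = deep append after unfolding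
theorem pv_map_nest (L : List (PvKey × List PvLesson)) (r : PvYearD) (k : PvKey) (lesson : PvLesson)
    (hnd : (L.map Prod.fst).Nodup) (hmem : k ∈ L.map Prod.fst) (hp : pvPath r k = false) :
    (L.map (fun p => if p.1 == k then (k, p.2 ++ [lesson]) else p)).foldl pvInsNest r
      = pvM (L.foldl pvInsNest r) k lesson := by
  induction L generalizing r with
  | nil => simp at hmem
  | cons e L ih =>
    rw [List.map_cons] at hnd
    by_cases he : e.1 = k
    · have hL : ∀ p ∈ L, p.1 ≠ k := by
        intro p hpL hpk
        apply (List.nodup_cons.mp hnd).1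
        rw [he, ← hpk]
        exact List.mem_map_of_mem hpL
      have hmap : L.map (fun p => if p.1 == k then (k, p.2 ++ [lesson]) else p) = L := by
        conv_rhs => rw [← List.map_id L]
        apply List.map_congr_left
        intro p hpL
        rw [if_neg (by simp [hL p hpL])]
        rfl
      rw [List.map_cons, if_pos (by simp [he]), List.foldl_cons, List.foldl_cons, hmap]
      have he2 : e = (k, e.2) := by rw [← he]
      rw [he2, pvM_insNest_self r k e.2 lesson]
      exact pv_foldl_M L (pvInsNest r (k, e.2)) k lesson hL
        (by rw [pvPath_insNest]; simp)
    · have hmem' : k ∈ L.map Prod.fst := by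
        rcases List.mem_cons.mp hmem with h | h
        · exact absurd h.symm he
        · exact h
      rw [List.map_cons, if_neg (by simp [he]), List.foldl_cons, List.foldl_cons]
      exact ih (pvInsNest r e) (List.nodup_cons.mp hnd).2 hmem'
        (by rw [pvPath_insNest, hp, pvKey_beq_eq_decide]; simp [Ne.symm he])

-- on a fresh path, B's unfold step of a singleton group equals A's branch cascade
theorem pv_insNest_new (t : PvYearD) (lesson : PvLesson) (hp : pvPath t (pvKey lesson) = false) :
    pvInsNest t (pvKey lesson, [lesson]) = pvStepA t lesson := by
  simp only [pvPath, pvKey] at hp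
  simp only [pvInsNest, pvStepA, pvKey, PySem.Dict.modify]
  by_cases h1 : t.contains (pvYear lesson) = true
  · by_cases h2 : (t.getD (pvYear lesson) PySem.Dict.empty).contains (pvMonth lesson) = true
    · simp only [h1, h2, if_true, hp, Bool.false_eq_true, if_false,
        PySem.Dict.getD_insert_self, PySem.Dict.insert_insert_self, List.nil_append]
    · have h2f : (t.getD (pvYear lesson) PySem.Dict.empty).contains (pvMonth lesson) = false := by
        simpa using h2
      simp only [h1, h2f, if_true, Bool.false_eq_true, if_false,
        PySem.Dict.getD_insert_self, PySem.Dict.insert_insert_self,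
        PySem.Dict.getD_of_not_contains _ _ h2f, PySem.Dict.getD_empty,
        PySem.Dict.contains_empty, List.nil_append]
  · have h1f : t.contains (pvYear lesson) = false := by simpa using h1
    simp only [h1f, Bool.false_eq_true, if_false,
      PySem.Dict.getD_insert_self, PySem.Dict.insert_insert_self,
      PySem.Dict.getD_of_not_contains _ _ h1f, PySem.Dict.getD_empty,
      PySem.Dict.contains_empty, List.nil_append]

-- on an existing path, A's branch cascade IS the deep append
theorem pv_stepA_present (t : PvYearD) (lesson : PvLesson) (hp : pvPath t (pvKey lesson) = true) :
    pvStepA t lesson = pvM t (pvKey lesson) lesson := by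
  obtain ⟨hcy, hcm⟩ := pv_path_contains t (pvKey lesson) hp
  simp only [pvPath, pvKey] at hp
  simp only [pvKey] at hcy hcm
  simp only [pvStepA, pvM, pvKey, PySem.Dict.modify, hcy, hcm, hp, if_true]

-- one loop step: grouping then unfolding = A's direct step on the unfolded state
theorem pv_step_comm (g : PvFlat) (lesson : PvLesson) (h : g.keys.Nodup) :
    pvNest (pvStepF g lesson).items = pvStepA (pvNest g.items) lesson := by
  have hpath : pvPath (pvNest g.items) (pvKey lesson) = g.contains (pvKey lesson) := by
    rw [pvNest, pvPath_foldl]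
    rfl
  have hnd : (g.items.map Prod.fst).Nodup := by simpa [PySem.Dict.keys] using h
  by_cases hc : g.contains (pvKey lesson) = true
  · rw [pv_stepA_present _ _ (by rw [hpath]; exact hc)]
    unfold pvStepF
    rw [show ((pvYear lesson, pvMonth lesson, pvDay lesson) : PvKey) = pvKey lesson from rfl]
    rw [if_pos hc]
    simp only [PySem.Dict.modify]
    rw [pvNest, PySem.Dict.items_insert_of_contains _ _ hc]
    have hmap : g.items.map
          (fun p => if p.1 == (pvKey lesson) then ((pvKey lesson), g.getD (pvKey lesson) [] ++ [lesson]) else p)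
        = g.items.map (fun p => if p.1 == (pvKey lesson) then ((pvKey lesson), p.2 ++ [lesson]) else p) := by
      apply List.map_congr_left
      intro p hpmem
      by_cases hk : p.1 = pvKey lesson
      · rw [if_pos (by simp [hk]), if_pos (by simp [hk])]
        have hget : g.get? (pvKey lesson) = some p.2 := by
          apply PySem.Dict.get?_of_mem_items _ _ h
          rw [← hk]
          exact hpmem
        rw [PySem.Dict.getD_eq_get?_getD, hget]
        rfl
      · rw [if_neg (by simp [hk]), if_neg (by simp [hk])]
    rw [hmap]
    have hmem : pvKey lesson ∈ g.items.map Prod.fst := by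
      have := (PySem.Dict.contains_iff_mem_keys g (pvKey lesson)).mp hc
      simpa [PySem.Dict.keys] using this
    exact pv_map_nest g.items PySem.Dict.empty (pvKey lesson) lesson hnd hmem rfl
  · have hcf : g.contains (pvKey lesson) = false := by simpa using hc
    unfold pvStepF
    rw [show ((pvYear lesson, pvMonth lesson, pvDay lesson) : PvKey) = pvKey lesson from rfl]
    rw [if_neg (by simp [hcf])]
    rw [pvNest, PySem.Dict.items_insert_of_not_contains _ _ hcf, List.foldl_append,
      List.foldl_cons, List.foldl_nil]
    exact pv_insNest_new _ lesson (by rw [← pvNest, hpath]; exact hcf)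

-- the whole loops agree
theorem pv_main (lessons : List PvLesson) (g : PvFlat) (h : g.keys.Nodup) :
    lessons.foldl pvStepA (pvNest g.items) = pvNest ((lessons.foldl pvStepF g).items) := by
  induction lessons generalizing g with
  | nil => rfl
  | cons l ls ih =>
    rw [List.foldl_cons, List.foldl_cons, ← pv_step_comm g l h]
    exact ih (pvStepF g l) (pv_nodup_stepF g l h)

-- ===== VERDICT (by name: the statement is the Claim_ definition above) =====
theorem create_date_dict_spec : Claim_equal_create_date_dict := by
  intro lessons _ _
  unfold Spec_create_date_dict create_date_dict create_date_dict_alt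
  have h := pv_main lessons PySem.Dict.empty PySem.Dict.nodup_keys_empty
  rw [show pvNest (PySem.Dict.empty : PvFlat).items = (PySem.Dict.empty : PvYearD) from rfl] at h
  rw [h]
  rfl
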